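-- pv_equiv track=rewrite | github.com/enzo775/TIPE_IA_Exo-planet | Ondelettes/Compression d'image/Compression image.py | upscale_rapport2
-- ===== SOURCE A (Python) =====
-- def upscale_rapport2(L):
--     n = len(L)
--     L_upscaled = []
--     ligne_upscaled = []
--     for i in range(n):
--         ligne = []
--         for j in range(n):
--             ligne += [L[i][j]]*2
--         ligne_upscaled.append(ligne)
--     for i in range(n*2):
--         colonne = []
--         for j in range(n):
--             colonne += [ligne_upscaled[j][i]]*2
--         L_upscaled.append(colonne)
--     return L_upscaled
-- ===== SOURCE B (Python) =====
-- def upscale_rapport2(L):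
--     n = len(L)
--     return [[L[c//2][r//2] for c in range(2*n)] for r in range(2*n)]
-- ===== Notes on version B (the rewrite author's own statement) =====
-- stated objective: simpler
-- what changed: Replaces A's two-phase construction (horizontally doubled intermediate matrix, then a second transposing column pass) by a single double comprehension that computes each output cell directly as L[c//2][r//2], preserving A's axis swap.
import Mathlib
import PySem

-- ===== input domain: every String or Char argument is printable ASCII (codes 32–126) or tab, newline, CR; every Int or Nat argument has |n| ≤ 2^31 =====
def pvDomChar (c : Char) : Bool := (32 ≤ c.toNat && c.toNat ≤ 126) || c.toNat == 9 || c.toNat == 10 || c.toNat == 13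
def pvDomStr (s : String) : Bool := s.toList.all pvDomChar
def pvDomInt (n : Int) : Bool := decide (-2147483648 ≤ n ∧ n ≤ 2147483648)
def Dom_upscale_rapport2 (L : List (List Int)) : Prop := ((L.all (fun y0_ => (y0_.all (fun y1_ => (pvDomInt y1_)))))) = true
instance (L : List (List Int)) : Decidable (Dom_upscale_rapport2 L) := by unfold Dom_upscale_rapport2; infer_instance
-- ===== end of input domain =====

-- B replaces A's two-phase build (row-doubled intermediate, then a transposing column pass)
-- by one direct double comprehension L[c//2][r//2]; objective: simpler.

-- ===== PORT A =====
def upscale_rapport2 (L : List (List Int)) : List (List Int) :=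
  let n : Int := L.length
  let ligne_upscaled : List (List Int) :=
    (PySem.List.pyRange 0 n 1).foldl (fun acc i =>
      acc ++ [(PySem.List.pyRange 0 n 1).foldl (fun ligne j =>
        ligne ++ [PySem.List.pyGetD (PySem.List.pyGetD L i []) j 0,
                  PySem.List.pyGetD (PySem.List.pyGetD L i []) j 0]) []]) []
  (PySem.List.pyRange 0 (n * 2) 1).foldl (fun acc i =>
    acc ++ [(PySem.List.pyRange 0 n 1).foldl (fun colonne j =>
      colonne ++ [PySem.List.pyGetD (PySem.List.pyGetD ligne_upscaled j []) i 0,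
                  PySem.List.pyGetD (PySem.List.pyGetD ligne_upscaled j []) i 0]) []]) []

-- ===== PORT B =====
def upscale_rapport2_alt (L : List (List Int)) : List (List Int) :=
  let n : Int := L.length
  (PySem.List.pyRange 0 (2 * n) 1).map (fun r =>
    (PySem.List.pyRange 0 (2 * n) 1).map (fun c =>
      PySem.List.pyGetD
        (PySem.List.pyGetD L (PySem.Int.floordiv c 2) [])
        (PySem.Int.floordiv r 2) 0))

-- ===== PRECONDITION & SPEC =====
-- Pre_ excludes exactly the inputs where Python A raises IndexError: a row shorter than len(L).
def Pre_upscale_rapport2 (L : List (List Int)) : Prop :=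
  ∀ row ∈ L, L.length ≤ row.length
instance (L : List (List Int)) : Decidable (Pre_upscale_rapport2 L) := by
  unfold Pre_upscale_rapport2; infer_instance
def pvWitness_upscale_rapport2 : List (List Int) := [[1, 2], [3, 4]]

def Spec_upscale_rapport2 (L : List (List Int)) (out : List (List Int)) : Prop :=
  out = upscale_rapport2_alt L
instance (L : List (List Int)) (out : List (List Int)) : Decidable (Spec_upscale_rapport2 L out) := by
  unfold Spec_upscale_rapport2; infer_instance

-- ===== CLAIM (what is proved, stated in full; the proofs are below) =====
def Claim_equal_upscale_rapport2 : Prop :=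
  ∀ (L : List (List Int)), Dom_upscale_rapport2 L → Pre_upscale_rapport2 L →
    Spec_upscale_rapport2 L (upscale_rapport2 L)

-- ===== LEMMAS AND PROOFS =====

-- pyRange 0 n 1 over a Nat bound is range n, cast.
theorem pv_pyRange_zero (n : Nat) :
    PySem.List.pyRange 0 (n : Int) 1 = (List.range n).map (fun (k : Nat) => (k : Int)) := by
  rw [PySem.List.pyRange_one]
  have h : ((n : Int) - 0).toNat = n := by omega
  rw [h]
  apply List.map_congr_left
  intro k _
  omega

theorem pv_getD_map_range {α : Type} (f : Nat → α) (n k : Nat) (hk : k < n) (d : α) :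
    ((List.range n).map f).getD k d = f k := by
  simp [List.getD_eq_getElem?_getD, hk]

-- duplication loop = index-arithmetic comprehension
theorem pv_dup (v : Nat → Int) (n : Nat) :
    (List.range n).flatMap (fun j => [v j, v j])
      = (List.range (2 * n)).map (fun c => v (c / 2)) := by
  induction n with
  | zero => simp
  | succ m ih =>
      have h2 : 2 * (m + 1) = (2 * m + 1) + 1 := by omega
      rw [List.range_succ, h2, List.range_succ, List.range_succ]
      simp only [List.flatMap_append, List.map_append, ih, List.flatMap_cons,
        List.flatMap_nil, List.map_cons, List.map_nil]
      have e1 : (2 * m) / 2 = m := by omega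
      have e2 : (2 * m + 1) / 2 = m := by omega
      rw [e1, e2]
      simp

theorem pv_flatMap_single {α β : Type} (f : α → β) (l : List α) :
    l.flatMap (fun x => [f x]) = l.map f := by
  induction l with
  | nil => rfl
  | cons a t ih => simp [ih]

theorem upscale_rapport2_eq (L : List (List Int)) :
    upscale_rapport2 L = upscale_rapport2_alt L := by
  unfold upscale_rapport2 upscale_rapport2_alt
  set n := L.length with hn
  have hrange : PySem.List.pyRange 0 (n : Int) 1 = (List.range n).map (fun (k : Nat) => (k : Int)) :=
    pv_pyRange_zero n
  have hrange2 : PySem.List.pyRange 0 ((n : Int) * 2) 1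
      = (List.range (2 * n)).map (fun (k : Nat) => (k : Int)) := by
    have : ((n : Int) * 2) = ((2 * n : Nat) : Int) := by push_cast; ring
    rw [this, pv_pyRange_zero]
  have hrange2' : PySem.List.pyRange 0 (2 * (n : Int)) 1
      = (List.range (2 * n)).map (fun (k : Nat) => (k : Int)) := by
    have : (2 * (n : Int)) = ((2 * n : Nat) : Int) := by push_cast; ring
    rw [this, pv_pyRange_zero]
  simp only [hrange, hrange2, hrange2', List.foldl_map, List.map_map]
  -- turn every foldl-append into flatMap / map
  simp only [PySem.List.foldl_append_eq_flatMap, List.nil_append]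
  -- resolve the Int-cast indexing and floor divisions
  simp only [PySem.List.pyGetD_natCast, pv_flatMap_single]
  -- the intermediate matrix, row by row
  apply List.map_congr_left
  intro i hi
  have hi2 : i < 2 * n := List.mem_range.mp hi
  rw [pv_dup (fun j =>
    (((List.range n).map (fun i' =>
        (List.range n).flatMap (fun j' => [(L.getD i' []).getD j' 0, (L.getD i' []).getD j' 0]))).getD j []).getD i 0) n]
  apply List.map_congr_left
  intro c hc
  have hc2 : c < 2 * n := List.mem_range.mp hc
  have hcn : c / 2 < n := by omega
  rw [pv_getD_map_range _ n (c / 2) hcn]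
  rw [pv_dup (fun j' => (L.getD (c / 2) []).getD j' 0) n]
  rw [pv_getD_map_range _ (2 * n) i hi2]
  simp [PySem.Int.floordiv, Int.fdiv_eq_ediv]
  have e1 : ((c : Int) / 2) = ((c / 2 : Nat) : Int) := by omega
  have e2 : ((i : Int) / 2) = ((i / 2 : Nat) : Int) := by omega
  rw [e1, e2, PySem.List.pyGetD_natCast, PySem.List.pyGetD_natCast,
    List.getD_eq_getElem?_getD, List.getD_eq_getElem?_getD]

-- ===== VERDICT (by name: the statement is the Claim_ definition above) =====
theorem upscale_rapport2_spec : Claim_equal_upscale_rapport2 := by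
  intro L _ _
  unfold Spec_upscale_rapport2
  exact upscale_rapport2_eq L
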